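-- pv_equiv track=rewrite | github.com/voidf/bot_irori | basicutils/Algorithm.py | A072233_list
-- ===== SOURCE A (Python) =====
-- def A072233_list(n: int, m: int, mod=0) -> list:
--     """n个无差别球塞进m个无差别盒子方案数"""
--     mod = int(mod)
--     f = [[0 for j in range(m+1)] for i in range(n+1)]
--     f[0][0] = 1
--     for i in range(1, n+1):
--         for j in range(1, min(i+1, m+1)): # 只是求到m了话没必要打更大的
--             f[i][j] = f[i-1][j-1] + f[i-j][j]
--             if mod: f[i][j] %= mod
--     return f
-- ===== SOURCE B (Python) =====
-- def A072233_list(n: int, m: int, mod=0) -> list: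
--     """n个无差别球塞进m个无差别盒子方案数"""
--     mod = int(mod)
--     f = [[0] * (m + 1) for _ in range(n + 1)]
--     f[0][0] = 1
--     # g[t] = number of partitions of t into parts each of size <= s (kept reduced);
--     # conjugation: partitions of t into exactly s parts = partitions of t-s into parts <= s,
--     # so while extending row s we can fill column s of f and forget the row afterwards.
--     g = [1] + [0] * n
--     for s in range(1, m + 1):
--         h = g[:]
--         for t in range(s, n + 1):
--             v = h[t] + h[t - s]
--             h[t] = v % mod if mod else v
--             w = h[t - s]
--             f[t][s] = w % mod if mod else w
--         g = h
--     return f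
-- ===== Notes on version B (the rewrite author's own statement) =====
-- stated objective: alternative
-- what changed: B replaces A's (total, part-count) recurrence f[i][j]=f[i-1][j-1]+f[i-j][j] by a coin-change DP over part sizes s=1..m (g[t] <- g[t]+g[t-s], partitions into parts <= s) and fills column s of the output via the conjugation identity f[t][s] = red(g[t-s]) in the same pass, keeping only one DP row instead of A's full-table recurrence.
import Mathlib
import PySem

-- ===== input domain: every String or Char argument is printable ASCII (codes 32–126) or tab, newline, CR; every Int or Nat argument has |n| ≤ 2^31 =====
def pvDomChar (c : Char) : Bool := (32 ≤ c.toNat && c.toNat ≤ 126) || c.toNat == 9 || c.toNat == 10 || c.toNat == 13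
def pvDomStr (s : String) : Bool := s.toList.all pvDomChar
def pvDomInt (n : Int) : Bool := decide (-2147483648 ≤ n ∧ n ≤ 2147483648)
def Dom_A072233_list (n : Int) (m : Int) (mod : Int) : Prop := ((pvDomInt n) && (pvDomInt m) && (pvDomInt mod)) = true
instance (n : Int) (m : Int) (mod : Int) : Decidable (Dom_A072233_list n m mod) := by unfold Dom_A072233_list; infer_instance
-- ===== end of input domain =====

-- B replaces A's (total, part-count) DP by a coin-change DP over part sizes that fills
-- the output column-by-column via the conjugation identity f[t][s] = red(g[t-s]);
-- same results, a genuinely different algorithm of the same cost (objective: alternative).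

-- `x % mod if mod else x` / `if mod: v %= mod` (shared by both ports)
def pvRed (mod x : Int) : Int := if mod ≠ 0 then PySem.Int.mod x mod else x

-- 2-d table read f[i][j] / write f[i][j] = v.  Indices reached by either program are
-- nonnegative and in range whenever Pre_ holds (Python raises IndexError exactly on the
-- inputs Pre_ excludes), so the defaults are never used on admitted inputs.
def pvGet2 (f : List (List Int)) (i j : Int) : Int := (f.getD i.toNat []).getD j.toNat 0
def pvSet2 (f : List (List Int)) (i j : Int) (v : Int) : List (List Int) :=
  f.set i.toNat ((f.getD i.toNat []).set j.toNat v)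

-- ===== PORT A =====
def A072233_list (n : Int) (m : Int) (mod : Int) : List (List Int) :=
  let f := (PySem.List.pyRange 0 (n+1) 1).map
    (fun _ => (PySem.List.pyRange 0 (m+1) 1).map (fun _ => (0 : Int)))
  let f := pvSet2 f 0 0 1
  (PySem.List.pyRange 1 (n+1) 1).foldl (fun f i =>
    (PySem.List.pyRange 1 (min (i+1) (m+1)) 1).foldl (fun f j =>
      pvSet2 f i j (pvRed mod (pvGet2 f (i-1) (j-1) + pvGet2 f (i-j) j))) f) f

-- ===== PORT B =====
def A072233_list_alt (n : Int) (m : Int) (mod : Int) : List (List Int) :=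
  let f := (PySem.List.pyRange 0 (n+1) 1).map
    (fun _ => (PySem.List.pyRange 0 (m+1) 1).map (fun _ => (0 : Int)))
  let f := pvSet2 f 0 0 1
  let g : List Int := 1 :: List.replicate n.toNat 0
  ((PySem.List.pyRange 1 (m+1) 1).foldl
    (fun (st : List (List Int) × List Int) s =>
      (PySem.List.pyRange s (n+1) 1).foldl
        (fun (p : List (List Int) × List Int) t =>
          let h := p.2.set t.toNat (pvRed mod (p.2.getD t.toNat 0 + p.2.getD (t-s).toNat 0))
          (pvSet2 p.1 t s (pvRed mod (h.getD (t-s).toNat 0)), h))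
        (st.1, st.2))
    (f, g)).1

-- ===== PRECONDITION & SPEC =====
-- A raises IndexError (f[0][0] = 1 on an empty row/table) iff n < 0 or m < 0; B raises there too.
def Pre_A072233_list (n : Int) (m : Int) (mod : Int) : Prop := 0 ≤ n ∧ 0 ≤ m
instance (n : Int) (m : Int) (mod : Int) : Decidable (Pre_A072233_list n m mod) := by
  unfold Pre_A072233_list; infer_instance
def pvWitness_A072233_list : Int × Int × Int := (4, 3, 0)

def Spec_A072233_list (n : Int) (m : Int) (mod : Int) (out : List (List Int)) : Prop :=
  out = A072233_list_alt n m mod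
instance (n : Int) (m : Int) (mod : Int) (out : List (List Int)) : Decidable (Spec_A072233_list n m mod out) := by
  unfold Spec_A072233_list; infer_instance

-- ===== CLAIM (what is proved, stated in full; the proofs are below) =====
def Claim_equal_A072233_list : Prop := ∀ (n : Int) (m : Int) (mod : Int),
  Dom_A072233_list n m mod → Pre_A072233_list n m mod →
  Spec_A072233_list n m mod (A072233_list n m mod)

-- ===== LEMMAS AND PROOFS =====

-- reduction facts -------------------------------------------------------------
theorem pvRed_fmod_emod (x M : Int) : (x.fmod M) % M = x % M := by
  rw [Int.fmod_eq_emod]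
  split
  · simp [Int.emod_emod_of_dvd _ dvd_rfl]
  · rw [Int.add_emod_right, Int.emod_emod_of_dvd _ dvd_rfl]

theorem pvRed_congr {M x y : Int} (h : x % M = y % M) : pvRed M x = pvRed M y := by
  unfold pvRed
  by_cases hM : M = 0
  · subst hM; simpa using h
  · simp only [hM, ne_eq, not_false_iff]
    show x.fmod M = y.fmod M
    rw [Int.fmod_eq_emod, Int.fmod_eq_emod, h]
    have : (M ∣ x) ↔ (M ∣ y) := by
      rw [Int.dvd_iff_emod_eq_zero, Int.dvd_iff_emod_eq_zero, h]
    simp [this]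

theorem pvRed_emod (M x : Int) : (pvRed M x) % M = x % M := by
  unfold pvRed; split
  · exact pvRed_fmod_emod x M
  · rfl

theorem pvRed_idem (M x : Int) : pvRed M (pvRed M x) = pvRed M x :=
  pvRed_congr (pvRed_emod M x)

theorem pvRed_add_congr {M x x' y y' : Int} (h1 : x % M = x' % M) (h2 : y % M = y' % M) :
    pvRed M (x + y) = pvRed M (x' + y') := by
  apply pvRed_congr
  rw [Int.add_emod, h1, h2, ← Int.add_emod]

-- the two mathematical recurrences --------------------------------------------
-- pvP mod i j = A's cell value: partitions of i into exactly j parts, reduced each step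
def pvP (mod : Int) : Nat → Nat → Int
  | 0, 0 => 1
  | 0, _+1 => 0
  | _+1, 0 => 0
  | i+1, j+1 =>
    if i+1 < j+1 then 0
    else pvRed mod (pvP mod i j + pvP mod (i-j) (j+1))
termination_by i _ => i
decreasing_by all_goals omega

-- pvQ mod s t = B's cell value: partitions of t into parts ≤ s, reduced each step
def pvQ (mod : Int) : Nat → Nat → Int
  | 0, t => if t = 0 then 1 else 0
  | s+1, t =>
    if t < s+1 then pvQ mod s t
    else pvRed mod (pvQ mod s t + pvQ mod (s+1) (t-(s+1)))
termination_by s t => (s, t)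
decreasing_by all_goals simp_wf <;> omega

theorem pvP_zero_of_lt (mod : Int) {i j : Nat} (h : i < j) : pvP mod i j = 0 := by
  cases i with
  | zero => cases j with
    | zero => omega
    | succ j' => simp [pvP]
  | succ i' => cases j with
    | zero => omega
    | succ j' => simp [pvP, h]

theorem pvP_red {mod : Int} {i j : Nat} (h1 : 1 ≤ j) (hj : j ≤ i) :
    pvRed mod (pvP mod i j) = pvP mod i j := by
  cases i with
  | zero => omega
  | succ i' => cases j with
    | zero => omega
    | succ j' =>
      rw [pvP]
      have : ¬ (i' + 1 < j' + 1) := by omega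
      rw [if_neg this, pvRed_idem]

-- the conjugation identity, with per-step reduction
theorem pvP_eq_pvQ (mod : Int) : ∀ i j, j ≤ i →
    pvRed mod (pvP mod i j) = pvRed mod (pvQ mod j (i - j)) := by
  intro i
  induction i using Nat.strong_induction_on with
  | _ i IH =>
    intro j hj
    cases j with
    | zero =>
      cases i with
      | zero => simp [pvP, pvQ]
      | succ i' => simp [pvP, pvQ]
    | succ j' =>
      cases i with
      | zero => omega
      | succ i' =>
        have hji : ¬ (i' + 1 < j' + 1) := by omega
        rw [pvP, if_neg hji]
        set t := i' + 1 - (j' + 1) with ht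
        have htt : i' - j' = t := by omega
        by_cases hlt : t < j' + 1
        · -- f[i-j][j] = 0 since j > i-j
          have h2 : pvP mod (i' - j') (j' + 1) = 0 := by
            rw [htt]; exact pvP_zero_of_lt mod hlt
          have h1 : pvRed mod (pvP mod i' j') = pvRed mod (pvQ mod j' (i' - j')) :=
            IH i' (by omega) j' (by omega)
          rw [pvRed_idem, pvQ, if_pos hlt] at *
          rw [h2, add_zero]
          calc pvRed mod (pvP mod i' j')
              = pvRed mod (pvQ mod j' (i' - j')) := h1
            _ = pvRed mod (pvQ mod j' t) := by rw [htt]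
        · -- t ≥ j+1
          have h1 : pvRed mod (pvP mod i' j') = pvRed mod (pvQ mod j' (i' - j')) :=
            IH i' (by omega) j' (by omega)
          have h2 : pvRed mod (pvP mod (i' - j') (j' + 1)) =
              pvRed mod (pvQ mod (j' + 1) ((i' - j') - (j' + 1))) :=
            IH (i' - j') (by omega) (j' + 1) (by omega)
          have harg : (i' - j') - (j' + 1) = t - (j' + 1) := by omega
          rw [pvRed_idem, pvQ, if_neg hlt, pvRed_idem]
          -- reduce pvRed-equalities to emod equalities
          apply pvRed_add_congr
          · calc pvP mod i' j' % mod
                = pvRed mod (pvP mod i' j') % mod := by rw [pvRed_emod]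
              _ = pvRed mod (pvQ mod j' (i' - j')) % mod := by rw [h1]
              _ = pvQ mod j' t % mod := by rw [pvRed_emod, htt]
          · calc pvP mod (i' - j') (j' + 1) % mod
                = pvRed mod (pvP mod (i' - j') (j' + 1)) % mod := by rw [pvRed_emod]
              _ = pvRed mod (pvQ mod (j' + 1) ((i' - j') - (j' + 1))) % mod := by rw [h2]
              _ = pvQ mod (j' + 1) (t - (j' + 1)) % mod := by rw [pvRed_emod, harg]


-- generic list-of-map-range lemmas ---------------------------------------------
theorem pvGetD_map_range {α : Type} (F : Nat → α) {n k : Nat} (d : α) (hkn : k < n) :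
    ((List.range n).map F).getD k d = F k := by
  rw [List.getD_eq_getElem?_getD]
  simp [hkn]

theorem pvSet_map_range {α : Type} (F : Nat → α) {n k : Nat} (v : α) (hkn : k < n) :
    ((List.range n).map F).set k v = (List.range n).map (fun i => if i = k then v else F i) := by
  apply List.ext_getElem
  · simp
  · intro i h1 h2
    simp only [List.getElem_set, List.getElem_map, List.getElem_range]
    by_cases h : k = i
    · subst h; simp
    · simp [h, Ne.symm h]
    
-- rows and tables ---------------------------------------------------------------
def pvRow (mod : Int) (M i : Nat) : List Int := (List.range (M+1)).map (fun j => pvP mod i j)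
def pvZRow (M : Nat) : List Int := (List.range (M+1)).map (fun _ => (0 : Int))
def pvTab (mod : Int) (N M : Nat) : List (List Int) :=
  (List.range (N+1)).map (fun i => pvRow mod M i)
def pvRowPart (mod : Int) (M i l : Nat) : List Int :=
  (List.range (M+1)).map (fun j => if 1 ≤ j ∧ j ≤ l then pvP mod i j else 0)
-- state of the output table of either program after the outer rows 1..k are done
def pvStateA (mod : Int) (N M k : Nat) : List (List Int) :=
  (List.range (N+1)).map (fun i => if i ≤ k then pvRow mod M i else pvZRow M)
-- ... and while row k+1 is filled up to column l
def pvStateAB (mod : Int) (N M k l : Nat) : List (List Int) :=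
  (List.range (N+1)).map (fun i =>
    if i ≤ k then pvRow mod M i else if i = k+1 then pvRowPart mod M (k+1) l else pvZRow M)

theorem pvP_succ_zero (mod : Int) (i : Nat) : pvP mod (i+1) 0 = 0 := by simp [pvP]

theorem pvRowPart_zero (mod : Int) (M i : Nat) : pvRowPart mod M i 0 = pvZRow M := by
  unfold pvRowPart pvZRow
  apply List.map_congr_left
  intro j _
  simp only [ite_eq_right_iff]
  omega

theorem pvRowPart_full (mod : Int) (M i : Nat) (hi : 1 ≤ i) :
    pvRowPart mod M i (min i M) = pvRow mod M i := by
  unfold pvRowPart pvRow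
  apply List.map_congr_left
  intro j hj
  rw [List.mem_range] at hj
  by_cases h : 1 ≤ j ∧ j ≤ min i M
  · simp [h]
  · rw [if_neg h]
    rcases Nat.eq_zero_or_pos j with h0 | h1
    · subst h0
      obtain ⟨i', rfl⟩ : ∃ i', i = i' + 1 := ⟨i - 1, by omega⟩
      rw [pvP_succ_zero]
    · have : i < j := by omega
      rw [pvP_zero_of_lt mod this]

theorem pvStateAB_zero (mod : Int) (N M k : Nat) :
    pvStateAB mod N M k 0 = pvStateA mod N M k := by
  unfold pvStateAB pvStateA
  apply List.map_congr_left
  intro i _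
  by_cases h : i ≤ k
  · simp [h]
  · rw [if_neg h, if_neg h]
    by_cases h2 : i = k + 1
    · rw [if_pos h2, pvRowPart_zero]
    · rw [if_neg h2]

theorem pvStateAB_full (mod : Int) (N M k : Nat) :
    pvStateAB mod N M k (min (k+1) M) = pvStateA mod N M (k+1) := by
  unfold pvStateAB pvStateA
  apply List.map_congr_left
  intro i _
  by_cases h : i ≤ k
  · rw [if_pos h, if_pos (by omega : i ≤ k + 1)]
  · rw [if_neg h]
    by_cases h2 : i = k+1
    · rw [if_pos h2, if_pos (by omega : i ≤ k+1), h2,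
        pvRowPart_full mod M (k+1) (by omega)]
    · rw [if_neg h2, if_neg (by omega : ¬ i ≤ k+1)]

-- reading / writing the mid-state ------------------------------------------------
theorem pvGet2_stateAB (mod : Int) (N M k l i j : Nat) (hiN : i ≤ N) (hi : i ≤ k) (hj : j ≤ M) :
    pvGet2 (pvStateAB mod N M k l) (↑i) (↑j) = pvP mod i j := by
  unfold pvGet2 pvStateAB
  rw [Int.toNat_natCast, Int.toNat_natCast,
    pvGetD_map_range _ _ (by omega : i < N + 1), if_pos hi]
  unfold pvRow
  rw [pvGetD_map_range _ _ (by omega : j < M + 1)]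

theorem pvSet2_stateAB (mod : Int) (N M k l : Nat) (hk : k < N) (hl : l < min (k+1) M) :
    pvSet2 (pvStateAB mod N M k l) (↑(k+1)) (↑(l+1)) (pvP mod (k+1) (l+1)) =
      pvStateAB mod N M k (l+1) := by
  unfold pvSet2
  rw [Int.toNat_natCast, Int.toNat_natCast]
  unfold pvStateAB
  rw [pvGetD_map_range _ _ (by omega : k + 1 < N + 1),
    if_neg (by omega : ¬ k + 1 ≤ k), if_pos rfl]
  unfold pvRowPart
  rw [pvSet_map_range _ _ (by omega : l + 1 < M + 1),
    pvSet_map_range _ _ (by omega : k + 1 < N + 1)]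
  apply List.map_congr_left
  intro i _
  by_cases hik : i = k + 1
  · subst hik
    rw [if_pos rfl, if_neg (by omega : ¬ k + 1 ≤ k), if_pos rfl]
    apply List.map_congr_left
    intro j _
    by_cases hjl : j = l + 1
    · subst hjl
      rw [if_pos rfl, if_pos (by omega)]
    · rw [if_neg hjl]
      by_cases hc : 1 ≤ j ∧ j ≤ l
      · rw [if_pos hc, if_pos (by omega)]
      · rw [if_neg hc, if_neg (by omega)]
  · rw [if_neg hik]
    by_cases hik2 : i ≤ k
    · rw [if_pos hik2, if_pos hik2]
    · rw [if_neg hik2, if_neg hik2, if_neg hik, if_neg hik]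


theorem pvStateA_full (mod : Int) (N M : Nat) : pvStateA mod N M N = pvTab mod N M := by
  unfold pvStateA pvTab
  apply List.map_congr_left
  intro i hi
  rw [List.mem_range] at hi
  rw [if_pos (by omega : i ≤ N)]

-- the freshly initialised output table (of either program) is pvStateA … 0
theorem pvInit (mod : Int) (N M : Nat) :
    pvSet2 ((PySem.List.pyRange 0 ((N:Int)+1) 1).map
        (fun _ => (PySem.List.pyRange 0 ((M:Int)+1) 1).map (fun _ => (0:Int)))) 0 0 1
      = pvStateA mod N M 0 := by
  have hN : (((N:Int)+1) - 0).toNat = N + 1 := by omega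
  have hM : (((M:Int)+1) - 0).toNat = M + 1 := by omega
  have hinit : ((PySem.List.pyRange 0 ((N:Int)+1) 1).map
        (fun _ => (PySem.List.pyRange 0 ((M:Int)+1) 1).map (fun _ => (0:Int))))
      = (List.range (N+1)).map (fun _ => pvZRow M) := by
    rw [PySem.List.pyRange_one 0 ((N:Int)+1), PySem.List.pyRange_one 0 ((M:Int)+1), hN, hM,
      List.map_map, List.map_map]
    rfl
  rw [hinit]
  unfold pvSet2
  have h1 : ((List.range (N+1)).map (fun _ => pvZRow M)).getD (0:Int).toNat [] = pvZRow M :=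
    pvGetD_map_range _ _ (by omega : 0 < N + 1)
  rw [h1]
  have h2 : (pvZRow M).set (0:Int).toNat 1 = pvRow mod M 0 := by
    unfold pvZRow pvRow
    rw [Int.toNat_zero, pvSet_map_range _ _ (by omega : 0 < M + 1)]
    apply List.map_congr_left
    intro j _
    cases j with
    | zero => simp [pvP]
    | succ j' => simp [pvP]
  rw [h2, Int.toNat_zero, pvSet_map_range _ _ (by omega : 0 < N + 1)]
  unfold pvStateA
  apply List.map_congr_left
  intro i _
  by_cases hi : i = 0
  · subst hi; rw [if_pos rfl, if_pos (by omega)]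
  · rw [if_neg hi, if_neg (by omega : ¬ i ≤ 0)]

-- generic outer assembly loop (shared by the two ports)
theorem pvOuter (mod : Int) (N M : Nat) (inner : List (List Int) → Int → List (List Int))
    (hinner : ∀ k, k < N → inner (pvStateA mod N M k) (↑(k+1)) = pvStateA mod N M (k+1)) :
    ∀ K, K ≤ N →
      (List.range K).foldl (fun f (k' : Nat) => inner f (1 + (k' : Int))) (pvStateA mod N M 0)
        = pvStateA mod N M K := by
  intro K
  induction K with
  | zero => intro _; rfl
  | succ K IH =>
    intro hK
    rw [List.range_succ, List.foldl_append, IH (by omega), List.foldl_cons, List.foldl_nil]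
    have e : (1 + (K : Int)) = ((K + 1 : Nat) : Int) := by omega
    rw [e, hinner K (by omega)]

-- the inner assembly loop, generic in the value written (pvP in both cases)
theorem pvInner (mod : Int) (N M k : Nat) (hk : k < N)
    (step : List (List Int) → Int → List (List Int))
    (hstep : ∀ l, l < min (k+1) M →
      step (pvStateAB mod N M k l) (↑(l+1)) = pvStateAB mod N M k (l+1)) :
    ∀ L, L ≤ min (k+1) M →
      (List.range L).foldl (fun f (j' : Nat) => step f (1 + (j' : Int))) (pvStateA mod N M k)
        = pvStateAB mod N M k L := by
  intro L
  induction L with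
  | zero => intro _; rw [List.range_zero, List.foldl_nil, pvStateAB_zero]
  | succ L IH =>
    intro hL
    rw [List.range_succ, List.foldl_append, IH (by omega), List.foldl_cons, List.foldl_nil]
    have e : (1 + (L : Int)) = ((L + 1 : Nat) : Int) := by omega
    rw [e, hstep L (by omega)]

-- one write of port A's assembly loop
theorem pvStepA (mod : Int) (N M k l : Nat) (hk : k < N) (hl : l < min (k+1) M) :
    pvSet2 (pvStateAB mod N M k l) (↑(k+1)) (↑(l+1))
      (pvRed mod (pvGet2 (pvStateAB mod N M k l) ((↑(k+1):Int)-1) ((↑(l+1):Int)-1) +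
                  pvGet2 (pvStateAB mod N M k l) ((↑(k+1):Int)-(↑(l+1):Int)) (↑(l+1))))
      = pvStateAB mod N M k (l+1) := by
  have e1 : ((↑(k+1):Int) - 1) = ((k : Nat) : Int) := by omega
  have e2 : ((↑(l+1):Int) - 1) = ((l : Nat) : Int) := by omega
  have e3 : ((↑(k+1):Int) - (↑(l+1):Int)) = ((k - l : Nat) : Int) := by omega
  rw [e1, e2, e3,
    pvGet2_stateAB mod N M k l k l (by omega) (by omega) (by omega),
    pvGet2_stateAB mod N M k l (k-l) (l+1) (by omega) (by omega) (by omega)]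
  have hv : pvRed mod (pvP mod k l + pvP mod (k-l) (l+1)) = pvP mod (k+1) (l+1) := by
    rw [pvP, if_neg (by omega : ¬ k + 1 < l + 1)]
  rw [hv, pvSet2_stateAB mod N M k l hk hl]

-- B's tables ---------------------------------------------------------------------
def pvQRow (mod : Int) (N s : Nat) : List Int := (List.range (N+1)).map (fun t => pvQ mod s t)
def pvQRowPart (mod : Int) (N s l : Nat) : List Int :=
  (List.range (N+1)).map (fun t => if t ≤ s + l then pvQ mod (s+1) t else pvQ mod s t)

theorem pvQ_eq_below (mod : Int) {s t : Nat} (h : t ≤ s) : pvQ mod (s+1) t = pvQ mod s t := by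
  rw [pvQ, if_pos (by omega : t < s + 1)]

theorem pvQRowPart_zero (mod : Int) (N s : Nat) : pvQRowPart mod N s 0 = pvQRow mod N s := by
  unfold pvQRowPart pvQRow
  apply List.map_congr_left
  intro t _
  by_cases h : t ≤ s + 0
  · rw [if_pos h, pvQ_eq_below mod (by omega)]
  · rw [if_neg h]

theorem pvQRowPart_full (mod : Int) (N s : Nat) :
    pvQRowPart mod N s (N - s) = pvQRow mod N (s+1) := by
  unfold pvQRowPart pvQRow
  apply List.map_congr_left
  intro t ht
  rw [List.mem_range] at ht
  rw [if_pos (by omega : t ≤ s + (N - s))]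

-- one write of the coin-change row (h[t] = red(h[t] + h[t-s]))
theorem pvQRowPart_step (mod : Int) (N S I : Nat) (hI : I + 1 ≤ N - S) :
    (pvQRowPart mod N S I).set ((↑(S+1) + (I : Int) : Int)).toNat
      (pvRed mod ((pvQRowPart mod N S I).getD ((↑(S+1) + (I : Int) : Int)).toNat 0 +
                  (pvQRowPart mod N S I).getD ((↑(S+1) + (I : Int) - ↑(S+1) : Int)).toNat 0))
      = pvQRowPart mod N S (I+1) := by
  have e1 : ((↑(S+1) + (I : Int) : Int)).toNat = S + 1 + I := by omega
  have e2 : ((↑(S+1) + (I : Int) - ↑(S+1) : Int)).toNat = I := by omega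
  rw [e1, e2]
  unfold pvQRowPart
  rw [pvGetD_map_range _ _ (by omega : S + 1 + I < N + 1),
    pvGetD_map_range _ _ (by omega : I < N + 1),
    if_neg (by omega : ¬ S + 1 + I ≤ S + I), if_pos (by omega : I ≤ S + I),
    pvSet_map_range _ _ (by omega : S + 1 + I < N + 1)]
  have hv : pvRed mod (pvQ mod S (S+1+I) + pvQ mod (S+1) I) = pvQ mod (S+1) (S+1+I) := by
    conv_rhs => rw [pvQ]
    rw [if_neg (by omega : ¬ S + 1 + I < S + 1)]
    have e : S + 1 + I - (S + 1) = I := by omega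
    rw [e]
  apply List.map_congr_left
  intro t _
  by_cases h : t = S + 1 + I
  · subst h
    rw [if_pos rfl, hv, if_pos (by omega)]
  · rw [if_neg h]
    by_cases h2 : t ≤ S + I
    · rw [if_pos h2, if_pos (by omega)]
    · rw [if_neg h2, if_neg (by omega)]

-- the output table with columns 1..S filled
def pvStateC (mod : Int) (N M S : Nat) : List (List Int) :=
  (List.range (N+1)).map (fun i =>
    (List.range (M+1)).map (fun j => if j ≤ S then pvP mod i j else 0))
-- ... while column S+1 is filled down to row S+1+I
def pvCf (mod : Int) (N M S I : Nat) : List (List Int) :=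
  (List.range (N+1)).map (fun i =>
    (List.range (M+1)).map (fun j =>
      if j ≤ S ∨ (j = S+1 ∧ i < S+1+I) then pvP mod i j else 0))

theorem pvStateC_zero (mod : Int) (N M : Nat) :
    pvStateA mod N M 0 = pvStateC mod N M 0 := by
  unfold pvStateA pvStateC
  apply List.map_congr_left
  intro i _
  cases i with
  | zero =>
    rw [if_pos (le_refl 0)]
    unfold pvRow
    apply List.map_congr_left
    intro j _
    cases j with
    | zero => rw [if_pos (by omega)]
    | succ j' => rw [if_neg (by omega)]; simp [pvP]
  | succ i' =>
    rw [if_neg (by omega : ¬ i' + 1 ≤ 0)]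
    unfold pvZRow
    apply List.map_congr_left
    intro j _
    cases j with
    | zero => rw [if_pos (by omega), pvP_succ_zero]
    | succ j' => rw [if_neg (by omega)]

theorem pvStateC_full (mod : Int) (N M : Nat) :
    pvStateC mod N M M = pvTab mod N M := by
  unfold pvStateC pvTab
  apply List.map_congr_left
  intro i _
  unfold pvRow
  apply List.map_congr_left
  intro j hj
  rw [List.mem_range] at hj
  rw [if_pos (by omega : j ≤ M)]

theorem pvCf_zero (mod : Int) (N M S : Nat) :
    pvCf mod N M S 0 = pvStateC mod N M S := by
  unfold pvCf pvStateC
  apply List.map_congr_left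
  intro i _
  apply List.map_congr_left
  intro j _
  by_cases h1 : j ≤ S
  · rw [if_pos (Or.inl h1), if_pos h1]
  · by_cases h2 : j = S+1 ∧ i < S+1+0
    · rw [if_pos (Or.inr h2), if_neg h1, pvP_zero_of_lt mod (by omega)]
    · rw [if_neg (by omega), if_neg h1]

theorem pvCf_full (mod : Int) (N M S : Nat) :
    pvCf mod N M S (N - S) = pvStateC mod N M (S+1) := by
  unfold pvCf pvStateC
  apply List.map_congr_left
  intro i hi
  rw [List.mem_range] at hi
  apply List.map_congr_left
  intro j _
  by_cases h : j ≤ S+1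
  · rw [if_pos h, if_pos (by omega : j ≤ S ∨ (j = S+1 ∧ i < S+1+(N-S)))]
  · rw [if_neg (by omega), if_neg h]

-- one write of the column fill (f[t][s] = red(h[t-s]))
theorem pvCf_set (mod : Int) (N M S I : Nat) (hM : S + 1 ≤ M) (hI : S + 1 + I ≤ N) :
    pvSet2 (pvCf mod N M S I) (↑(S+1) + (I : Int)) (↑(S+1)) (pvP mod (S+1+I) (S+1))
      = pvCf mod N M S (I+1) := by
  unfold pvSet2
  have e1 : ((↑(S+1) + (I : Int) : Int)).toNat = S + 1 + I := by omega
  have e2 : ((↑(S+1) : Int)).toNat = S + 1 := by omega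
  rw [e1, e2]
  unfold pvCf
  rw [pvGetD_map_range _ _ (by omega : S + 1 + I < N + 1),
    pvSet_map_range _ _ (by omega : S + 1 < M + 1),
    pvSet_map_range _ _ (by omega : S + 1 + I < N + 1)]
  apply List.map_congr_left
  intro i _
  by_cases hi : i = S + 1 + I
  · subst hi
    rw [if_pos rfl]
    apply List.map_congr_left
    intro j _
    by_cases hj : j = S + 1
    · subst hj
      rw [if_pos rfl, if_pos (by omega)]
    · rw [if_neg hj]
      by_cases hc : j ≤ S
      · rw [if_pos (Or.inl hc), if_pos (Or.inl hc)]
      · rw [if_neg (by omega), if_neg (by omega)]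
  · rw [if_neg hi]
    apply List.map_congr_left
    intro j _
    by_cases hc : j ≤ S ∨ (j = S+1 ∧ i < S+1+I)
    · rw [if_pos hc, if_pos (by omega)]
    · rw [if_neg hc, if_neg (by omega)]

-- the merged inner loop of B: extend the row and fill the column, in one pass
theorem pvBInner (mod : Int) (N M S : Nat) (hM : S + 1 ≤ M) :
    ∀ I, I ≤ N - S →
      (List.range I).foldl
        (fun (p : List (List Int) × List Int) (t' : Nat) =>
          let h := p.2.set ((↑(S+1) + (t' : Int) : Int)).toNat
            (pvRed mod (p.2.getD ((↑(S+1) + (t' : Int) : Int)).toNat 0 +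
                        p.2.getD ((↑(S+1) + (t' : Int) - ↑(S+1) : Int)).toNat 0))
          (pvSet2 p.1 (↑(S+1) + (t' : Int)) (↑(S+1))
            (pvRed mod (h.getD ((↑(S+1) + (t' : Int) - ↑(S+1) : Int)).toNat 0)), h))
        (pvStateC mod N M S, pvQRow mod N S)
      = (pvCf mod N M S I, pvQRowPart mod N S I) := by
  intro I
  induction I with
  | zero => intro _; rw [List.range_zero, List.foldl_nil, pvCf_zero, pvQRowPart_zero]
  | succ I IH =>
    intro hI
    rw [List.range_succ, List.foldl_append, IH (by omega), List.foldl_cons, List.foldl_nil]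
    simp only []
    rw [pvQRowPart_step mod N S I (by omega)]
    have e2 : ((↑(S+1) + (I : Int) - ↑(S+1) : Int)).toNat = I := by omega
    rw [e2]
    unfold pvQRowPart
    rw [pvGetD_map_range _ _ (by omega : I < N + 1), if_pos (by omega : I ≤ S + (I+1))]
    have hv : pvRed mod (pvQ mod (S+1) I) = pvP mod (S+1+I) (S+1) := by
      have h1 := pvP_eq_pvQ mod (S+1+I) (S+1) (by omega)
      have e : S + 1 + I - (S + 1) = I := by omega
      rw [e] at h1
      rw [← h1, pvP_red (by omega) (by omega)]
    rw [hv, pvCf_set mod N M S I hM (by omega)]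

-- initial g row
theorem pvGInit (mod : Int) (N : Nat) :
    (1 : Int) :: List.replicate N 0 = pvQRow mod N 0 := by
  unfold pvQRow
  rw [List.range_succ_eq_map, List.map_cons, List.map_map]
  have h0 : pvQ mod 0 0 = 1 := by simp [pvQ]
  rw [h0]
  congr 1
  have : (List.range N).map (pvQ mod 0 ∘ Nat.succ) = (List.range N).map (fun _ => (0:Int)) := by
    apply List.map_congr_left
    intro t _
    simp [Function.comp, pvQ]
  rw [this, List.map_const', List.length_range]

-- the outer loop of B over part sizes s = 1..M
theorem pvBOuter (mod : Int) (N M : Nat)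
    (hbody : List (List Int) × List Int → Int → List (List Int) × List Int)
    (hb : hbody = fun st s =>
      (PySem.List.pyRange s ((N:Int)+1) 1).foldl
        (fun (p : List (List Int) × List Int) t =>
          let h := p.2.set t.toNat (pvRed mod (p.2.getD t.toNat 0 + p.2.getD (t-s).toNat 0))
          (pvSet2 p.1 t s (pvRed mod (h.getD (t-s).toNat 0)), h))
        (st.1, st.2)) :
    ∀ S, S ≤ M →
      (List.range S).foldl (fun st (s' : Nat) => hbody st (1 + (s' : Int)))
          (pvStateC mod N M 0, pvQRow mod N 0)
        = (pvStateC mod N M S, pvQRow mod N S) := by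
  intro S
  induction S with
  | zero => intro _; rfl
  | succ S IH =>
    intro hS
    rw [List.range_succ, List.foldl_append, IH (by omega), List.foldl_cons, List.foldl_nil, hb]
    simp only []
    have e : (1 + (S : Int)) = ((S + 1 : Nat) : Int) := by omega
    rw [e, PySem.List.pyRange_one ((S+1 : Nat) : Int) ((N:Int)+1)]
    have eL : (((N:Int)+1) - ((S+1 : Nat) : Int)).toNat = N - S := by omega
    rw [eL, List.foldl_map]
    refine Eq.trans (pvBInner mod N M S (by omega) (N - S) le_rfl) ?_
    rw [pvCf_full, pvQRowPart_full]

-- port A computes the pvP table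
theorem pvA_eq (mod : Int) (N M : Nat) :
    A072233_list (N:Int) (M:Int) mod = pvTab mod N M := by
  unfold A072233_list
  simp only []
  rw [pvInit mod N M, PySem.List.pyRange_one 1 ((N:Int)+1)]
  have eN : (((N:Int)+1) - 1).toNat = N := by omega
  rw [eN, List.foldl_map]
  refine Eq.trans
    (pvOuter mod N M
      (fun f i => (PySem.List.pyRange 1 (min (i+1) ((M:Int)+1)) 1).foldl
        (fun f j => pvSet2 f i j (pvRed mod (pvGet2 f (i-1) (j-1) + pvGet2 f (i-j) j))) f)
      ?_ N le_rfl)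
    (pvStateA_full mod N M)
  intro k hk
  simp only []
  rw [PySem.List.pyRange_one 1 (min ((↑(k+1):Int)+1) ((M:Int)+1))]
  have eL : ((min ((↑(k+1):Int)+1) ((M:Int)+1)) - 1).toNat = min (k+1) M := by omega
  rw [eL, List.foldl_map]
  refine Eq.trans
    (pvInner mod N M k hk
      (fun f j => pvSet2 f (↑(k+1)) j
        (pvRed mod (pvGet2 f ((↑(k+1):Int)-1) (j-1) + pvGet2 f ((↑(k+1):Int)-j) j)))
      ?_ (min (k+1) M) le_rfl)
    (pvStateAB_full mod N M k)
  intro l hl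
  exact pvStepA mod N M k l hk hl

-- port B computes the pvP table too
theorem pvB_eq (mod : Int) (N M : Nat) :
    A072233_list_alt (N:Int) (M:Int) mod = pvTab mod N M := by
  unfold A072233_list_alt
  simp only []
  rw [pvInit mod N M, pvStateC_zero, Int.toNat_natCast, pvGInit mod N,
    PySem.List.pyRange_one 1 ((M:Int)+1)]
  have eM : (((M:Int)+1) - 1).toNat = M := by omega
  rw [eM, List.foldl_map]
  rw [pvBOuter mod N M
    (fun st s =>
      (PySem.List.pyRange s ((N:Int)+1) 1).foldl
        (fun (p : List (List Int) × List Int) t =>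
          let h := p.2.set t.toNat (pvRed mod (p.2.getD t.toNat 0 + p.2.getD (t-s).toNat 0))
          (pvSet2 p.1 t s (pvRed mod (h.getD (t-s).toNat 0)), h))
        (st.1, st.2)) rfl M le_rfl]
  show pvStateC mod N M M = pvTab mod N M
  rw [pvStateC_full]

-- ===== VERDICT (by name: the statement is the Claim_ definition above) =====
theorem A072233_list_spec : Claim_equal_A072233_list := by
  unfold Claim_equal_A072233_list
  intro n m mod _ hpre
  unfold Pre_A072233_list at hpre
  unfold Spec_A072233_list
  obtain ⟨hn, hm⟩ := hpre
  obtain ⟨N, rfl⟩ : ∃ N : Nat, n = (N:Int) := ⟨n.toNat, (Int.toNat_of_nonneg hn).symm⟩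
  obtain ⟨M, rfl⟩ : ∃ M : Nat, m = (M:Int) := ⟨m.toNat, (Int.toNat_of_nonneg hm).symm⟩
  rw [pvA_eq, pvB_eq]
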